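-- pv_equiv track=rewrite | github.com/JeongSae/Algorithm | programmers/Level1/숫자 짝궁.py | solution
-- ===== SOURCE A (Python) =====
-- from collections import Counter
--
-- def solution(X, Y):
--     answer = ''
--
--     counted_x, counted_y = Counter(str(X)), Counter(str(Y))
--     for i_value in range(9, -1, -1):
--         answer += (str(i_value) * min(counted_x[str(i_value)], counted_y[str(i_value)]))
--
--     if answer == '' :
--         return '-1'
--     elif len(answer) == answer.count('0'):
--         return '0'
--     else :
--         return answer
-- ===== SOURCE B (Python) =====
-- from collections import deque
--
--
-- def solution(X, Y):
--     # two-pointer merge over descending-sorted digit sequences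
--     xs = deque(sorted((c for c in str(X) if c.isdigit()), reverse=True))
--     ys = deque(sorted((c for c in str(Y) if c.isdigit()), reverse=True))
--     res = []
--     while xs and ys:
--         if xs[0] == ys[0]:
--             res.append(xs[0])
--             xs.popleft()
--             ys.popleft()
--         elif xs[0] > ys[0]:
--             xs.popleft()
--         else:
--             ys.popleft()
--     if not res:
--         return '-1'
--     elif res[0] == '0':
--         return '0'
--     else:
--         return ''.join(res)
-- ===== Notes on version B (the rewrite author's own statement) =====
-- stated objective: alternative
-- what changed: Replaces the Counter-plus-digit-table construction (count every character of both strings, then walk digits 9..0 emitting each digit min-count times) with a sort-then-two-pointer merge: both digit sequences are sorted descending and a single merge pass collects the common digits already in descending order.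
import Mathlib
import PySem

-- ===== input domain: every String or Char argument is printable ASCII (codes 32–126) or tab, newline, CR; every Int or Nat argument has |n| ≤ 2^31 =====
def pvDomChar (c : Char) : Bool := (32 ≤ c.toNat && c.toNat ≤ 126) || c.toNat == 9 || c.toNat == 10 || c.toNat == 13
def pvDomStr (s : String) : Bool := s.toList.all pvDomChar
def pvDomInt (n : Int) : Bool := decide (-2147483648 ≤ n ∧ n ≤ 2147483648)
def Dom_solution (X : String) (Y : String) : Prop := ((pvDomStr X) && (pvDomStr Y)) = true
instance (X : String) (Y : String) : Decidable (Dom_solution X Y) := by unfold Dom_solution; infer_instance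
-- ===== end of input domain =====

-- B replaces A's Counter-plus-digit-table construction by a descending sort of both
-- digit sequences followed by a single two-pointer merge (alternative algorithm, same results).

-- ===== PORT A =====
-- Counter(str(X)) has the 1-char strings of X as keys; ported as a counter over the
-- list of 1-character strings, looked up at key str(i_value), exactly as A does.
def solution (X : String) (Y : String) : String :=
  let counted_x := PySem.Dict.counter (X.toList.map (fun c => String.ofList [c]))
  let counted_y := PySem.Dict.counter (Y.toList.map (fun c => String.ofList [c]))
  let answer : List Char := (PySem.List.pyRange 9 (-1) (-1)).foldl
    (fun acc i => acc ++ PySem.List.pyRepeat (PySem.Int.toStr i).toList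
        (min (counted_x.getD (PySem.Int.toStr i) 0) (counted_y.getD (PySem.Int.toStr i) 0))) []
  if answer = [] then "-1"
  else if PySem.Chars.len answer = PySem.Chars.count answer ['0'] then "0"
  else String.ofList answer

-- ===== PORT B =====
-- the two-pointer merge loop of Source B: consuming the front of each deque is popleft
def mergeCommonDesc : List Char → List Char → List Char
  | [], _ => []
  | _ :: _, [] => []
  | x :: xs, y :: ys =>
    if x = y then x :: mergeCommonDesc xs ys
    else if y < x then mergeCommonDesc xs (y :: ys)
    else mergeCommonDesc (x :: xs) ys

-- Chars.isdigit is exact for c.isdigit() on the Dom (ASCII) character set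
def solution_alt (X : String) (Y : String) : String :=
  let xs := PySem.List.sorted (X.toList.filter PySem.Chars.isdigit) (fun c => c) true
  let ys := PySem.List.sorted (Y.toList.filter PySem.Chars.isdigit) (fun c => c) true
  let res := mergeCommonDesc xs ys
  match res with
  | [] => "-1"
  | c :: _ => if c = '0' then "0" else String.ofList res

-- ===== PRECONDITION & SPEC =====
def Spec_solution (X : String) (Y : String) (out : String) : Prop := out = solution_alt X Y
instance (X : String) (Y : String) (out : String) : Decidable (Spec_solution X Y out) := by unfold Spec_solution; infer_instance

-- ===== CLAIM (what is proved, stated in full; the proofs are below) =====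
def Claim_equal_solution : Prop := ∀ (X : String) (Y : String), Dom_solution X Y → Spec_solution X Y (solution X Y)

-- ===== LEMMAS AND PROOFS =====

-- the ten digit characters, descending, as A's loop emits them
def dsL : List Char := ['9','8','7','6','5','4','3','2','1','0']

-- descending blocks: for each c of cs, f c copies of c
def blocks (f : Char → Nat) : List Char → List Char
  | [] => []
  | c :: cs => List.replicate (f c) c ++ blocks f cs

-- the per-digit quota both programs realise
def fmin (X Y : String) (c : Char) : Nat := min (X.toList.count c) (Y.toList.count c)

theorem mem_blocks {f : Char → Nat} {cs : List Char} {z : Char}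
    (h : z ∈ blocks f cs) : z ∈ cs := by
  induction cs with
  | nil => simp [blocks] at h
  | cons c cs ih =>
    simp only [blocks, List.mem_append, List.mem_replicate] at h
    rcases h with ⟨-, rfl⟩ | h
    · simp
    · simp [ih h]

theorem blocks_pairwise (f : Char → Nat) (cs : List Char)
    (h : cs.Pairwise (fun a b => b < a)) :
    (blocks f cs).Pairwise (fun a b => b ≤ a) := by
  induction cs with
  | nil => simp [blocks]
  | cons c cs ih =>
    rw [List.pairwise_cons] at h
    refine List.pairwise_append.2 ⟨?_, ih h.2, ?_⟩
    · exact List.pairwise_replicate.2 (Or.inr le_rfl)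
    · intro a ha b hb
      rw [List.mem_replicate] at ha
      exact (le_of_lt (h.1 b (mem_blocks hb))).trans (le_of_eq ha.2.symm)

theorem blocks_count (f : Char → Nat) (cs : List Char) (c : Char)
    (h : cs.Nodup) : (blocks f cs).count c = if c ∈ cs then f c else 0 := by
  induction cs with
  | nil => simp [blocks]
  | cons d cs ih =>
    rw [List.nodup_cons] at h
    by_cases hc : c = d
    · subst hc
      simp [blocks, List.count_append, ih h.2, h.1]
    · simp [blocks, List.count_append, List.count_replicate, ih h.2, hc]
      exact fun h' => absurd h'.symm hc

theorem mem_merge {xs ys : List Char} {z : Char}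
    (h : z ∈ mergeCommonDesc xs ys) : z ∈ xs ∧ z ∈ ys := by
  fun_induction mergeCommonDesc xs ys with
  | case1 => simp at h
  | case2 => simp at h
  | case3 xs x ys ih =>
    rcases List.mem_cons.1 h with rfl | h
    · simp
    · have := ih h
      simp [this.1, this.2]
  | case4 x xs y ys hne hlt ih =>
    have := ih h
    simp [this.1, this.2]
  | case5 x xs y ys hne hnlt ih =>
    have := ih h
    simp [this.1, this.2]

theorem merge_pairwise {xs ys : List Char}
    (hx : xs.Pairwise (fun a b => b ≤ a)) (hy : ys.Pairwise (fun a b => b ≤ a)) :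
    (mergeCommonDesc xs ys).Pairwise (fun a b => b ≤ a) := by
  fun_induction mergeCommonDesc xs ys with
  | case1 => simp
  | case2 => simp
  | case3 xs x ys ih =>
    rw [List.pairwise_cons] at hx hy
    refine List.pairwise_cons.2 ⟨?_, ih hx.2 hy.2⟩
    intro z hz
    exact hx.1 z (mem_merge hz).1
  | case4 x xs y ys hne hlt ih =>
    rw [List.pairwise_cons] at hx
    exact ih hx.2 hy
  | case5 x xs y ys hne hnlt ih =>
    rw [List.pairwise_cons] at hy
    exact ih hx hy.2

theorem merge_count {xs ys : List Char}
    (hx : xs.Pairwise (fun a b => b ≤ a)) (hy : ys.Pairwise (fun a b => b ≤ a))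
    (c : Char) :
    (mergeCommonDesc xs ys).count c = min (xs.count c) (ys.count c) := by
  fun_induction mergeCommonDesc xs ys with
  | case1 => simp
  | case2 => simp
  | case3 xs x ys ih =>
    rw [List.pairwise_cons] at hx hy
    have := ih hx.2 hy.2
    by_cases hc : c = x
    · subst hc; simp only [List.count_cons_self, this]; omega
    · simp [List.count_cons_of_ne (Ne.symm hc), this]
  | case4 x xs y ys hne hlt ih =>
    rw [List.pairwise_cons] at hx
    have hih := ih hx.2 hy
    have h0 : (y :: ys).count x = 0 := by
      rw [List.count_eq_zero]
      intro hm
      rcases List.mem_cons.1 hm with rfl | hm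
      · exact lt_irrefl _ hlt
      · exact absurd hlt (not_lt.2 ((List.pairwise_cons.1 hy).1 x hm))
    by_cases hc : c = x
    · subst hc; rw [hih, List.count_cons_self, h0]; omega
    · rw [hih, List.count_cons_of_ne (Ne.symm hc)]
  | case5 x xs y ys hne hnlt ih =>
    rw [List.pairwise_cons] at hy
    have hih := ih hx hy.2
    have hlt : x < y := lt_of_le_of_ne (not_lt.1 hnlt) hne
    have h0 : (x :: xs).count y = 0 := by
      rw [List.count_eq_zero]
      intro hm
      rcases List.mem_cons.1 hm with rfl | hm
      · exact lt_irrefl _ hlt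
      · exact absurd hlt (not_lt.2 ((List.pairwise_cons.1 hx).1 y hm))
    by_cases hc : c = y
    · subst hc; rw [hih, List.count_cons_self, h0]; omega
    · rw [hih, List.count_cons_of_ne (Ne.symm hc)]

theorem mem_dsL_iff (c : Char) : c ∈ dsL ↔ PySem.Chars.isdigit c = true := by
  constructor
  · intro h; fin_cases h <;> decide
  · intro h
    simp only [PySem.Chars.isdigit, Bool.and_eq_true, decide_eq_true_eq] at h
    have h1 : 48 ≤ c.toNat := h.1
    have h2 : c.toNat ≤ 57 := h.2
    interval_cases h3 : c.toNat <;>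
      · rw [show c = Char.ofNat c.toNat from (Char.ofNat_toNat c).symm, h3]
        decide

theorem getD_counter_digit (X : String) (c : Char) :
    (PySem.Dict.counter (X.toList.map (fun c => String.ofList [c]))).getD (String.ofList [c]) 0
      = (X.toList.count c : Int) := by
  rw [PySem.Dict.getD_counter]
  norm_cast
  have hinj : Function.Injective (fun c : Char => String.ofList [c]) := by
    intro a b h
    have h2 : (String.ofList [a]).toList = (String.ofList [b]).toList :=
      congrArg String.toList h
    simpa using h2
  exact List.count_map_of_injective _ _ hinj c

theorem count_sorted_rev (l : List Char) (c : Char) :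
    (PySem.List.sorted l (fun c => c) true).count c = l.count c :=
  (PySem.List.sorted_perm l (fun c => c) true).count_eq c

theorem count_filter_digit (l : List Char) (c : Char) :
    (l.filter PySem.Chars.isdigit).count c =
      if PySem.Chars.isdigit c then l.count c else 0 := by
  by_cases h : PySem.Chars.isdigit c = true
  · rw [if_pos h]
    exact List.count_filter h
  · rw [if_neg h]
    exact List.count_eq_zero.2 fun hm => h (List.mem_filter.1 hm).2

theorem go_singleton (c : Char) (l : List Char) :
    ∀ (fuel acc : Nat), l.length ≤ fuel →
      PySem.Chars.count.go [c] fuel l acc = acc + l.count c := by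
  induction l with
  | nil =>
    intro fuel acc _
    cases fuel <;> simp [PySem.Chars.count.go]
  | cons x t ih =>
    intro fuel acc hf
    cases fuel with
    | zero => simp at hf
    | succ fuel =>
      have hstep : PySem.Chars.count.go [c] (fuel + 1) (x :: t) acc =
          if [c].isPrefixOf (x :: t) then
            PySem.Chars.count.go [c] fuel (List.drop [c].length (x :: t)) (acc + 1)
          else PySem.Chars.count.go [c] fuel t acc := rfl
      by_cases hc : c = x
      · have hpre : [c].isPrefixOf (x :: t) = true := by
          simp [List.isPrefixOf, hc]
        rw [hstep, if_pos hpre]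
        simp only [List.length_cons, List.length_nil, List.drop_succ_cons, List.drop_zero]
        rw [ih fuel (acc + 1) (by simpa using hf), hc, List.count_cons_self]
        omega
      · have hpre : [c].isPrefixOf (x :: t) = false := by
          simp [List.isPrefixOf, hc]
        rw [hstep, if_neg (by simp [hpre])]
        rw [ih fuel acc (by simpa using hf), List.count_cons_of_ne (Ne.symm hc)]

theorem count_singleton (l : List Char) (c : Char) :
    PySem.Chars.count l [c] = l.count c := by
  have : PySem.Chars.count l [c] = PySem.Chars.count.go [c] l.length l 0 := by
    simp [PySem.Chars.count]
  rw [this, go_singleton c l l.length 0 le_rfl]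
  omega

theorem answer_eq (X Y : String) :
    (PySem.List.pyRange 9 (-1) (-1)).foldl
      (fun acc i => acc ++ PySem.List.pyRepeat (PySem.Int.toStr i).toList
        (min ((PySem.Dict.counter (X.toList.map (fun c => String.ofList [c]))).getD (PySem.Int.toStr i) 0)
             ((PySem.Dict.counter (Y.toList.map (fun c => String.ofList [c]))).getD (PySem.Int.toStr i) 0))) []
    = blocks (fmin X Y) dsL := by
  have hr : PySem.List.pyRange 9 (-1) (-1) = [9, 8, 7, 6, 5, 4, 3, 2, 1, 0] := by decide
  have hblock : ∀ c : Char,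
      PySem.List.pyRepeat [c]
        (min ((PySem.Dict.counter (X.toList.map (fun c => String.ofList [c]))).getD (String.ofList [c]) 0)
             ((PySem.Dict.counter (Y.toList.map (fun c => String.ofList [c]))).getD (String.ofList [c]) 0))
      = List.replicate (fmin X Y c) c := by
    intro c
    rw [PySem.List.pyRepeat_singleton, getD_counter_digit, getD_counter_digit]
    congr 1
    unfold fmin
    omega
  rw [hr]
  simp only [List.foldl]
  rw [show PySem.Int.toStr 9 = String.ofList ['9'] from by decide,
      show PySem.Int.toStr 8 = String.ofList ['8'] from by decide,
      show PySem.Int.toStr 7 = String.ofList ['7'] from by decide,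
      show PySem.Int.toStr 6 = String.ofList ['6'] from by decide,
      show PySem.Int.toStr 5 = String.ofList ['5'] from by decide,
      show PySem.Int.toStr 4 = String.ofList ['4'] from by decide,
      show PySem.Int.toStr 3 = String.ofList ['3'] from by decide,
      show PySem.Int.toStr 2 = String.ofList ['2'] from by decide,
      show PySem.Int.toStr 1 = String.ofList ['1'] from by decide,
      show PySem.Int.toStr 0 = String.ofList ['0'] from by decide]
  simp only [show ∀ c : Char, (String.ofList [c]).toList = [c] from fun c => by simp, hblock]
  simp [blocks, dsL, List.append_assoc]

theorem lists_eq (X Y : String) :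
    blocks (fmin X Y) dsL
      = mergeCommonDesc
          (PySem.List.sorted (X.toList.filter PySem.Chars.isdigit) (fun c => c) true)
          (PySem.List.sorted (Y.toList.filter PySem.Chars.isdigit) (fun c => c) true) := by
  have hx := PySem.List.sorted_pairwise_rev (X.toList.filter PySem.Chars.isdigit) (fun c => c)
  have hy := PySem.List.sorted_pairwise_rev (Y.toList.filter PySem.Chars.isdigit) (fun c => c)
  refine List.eq_of_perm_of_sorted (le := fun a b : Char => b ≤ a)
    (fun a b _ _ h1 h2 => le_antisymm h2 h1)
    (blocks_pairwise _ _ (by decide))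
    (merge_pairwise hx hy)
    (List.perm_iff_count.2 fun c => ?_)
  rw [blocks_count _ _ _ (by decide), merge_count hx hy c,
      count_sorted_rev, count_sorted_rev, count_filter_digit, count_filter_digit]
  by_cases h : PySem.Chars.isdigit c = true
  · rw [if_pos ((mem_dsL_iff c).2 h), if_pos h, if_pos h]; rfl
  · rw [if_neg (fun hm => h ((mem_dsL_iff c).1 hm)), if_neg h, if_neg h]
    simp

-- ===== VERDICT (by name: the statement is the Claim_ definition above) =====
theorem solution_spec : Claim_equal_solution := by
  unfold Claim_equal_solution Spec_solution
  intro X Y _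
  simp only [solution, solution_alt]
  rw [answer_eq X Y, lists_eq X Y]
  cases hres : mergeCommonDesc
      (PySem.List.sorted (X.toList.filter PySem.Chars.isdigit) (fun c => c) true)
      (PySem.List.sorted (Y.toList.filter PySem.Chars.isdigit) (fun c => c) true) with
  | nil => simp
  | cons c t =>
    have hx := PySem.List.sorted_pairwise_rev (X.toList.filter PySem.Chars.isdigit) (fun c => c)
    have hy := PySem.List.sorted_pairwise_rev (Y.toList.filter PySem.Chars.isdigit) (fun c => c)
    have hpw : (c :: t).Pairwise (fun a b : Char => b ≤ a) := hres ▸ merge_pairwise hx hy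
    have hdig : ∀ z ∈ c :: t, PySem.Chars.isdigit z = true := by
      intro z hz
      have hmem := mem_merge (hres ▸ hz)
      have := (PySem.List.mem_sorted _ _ _ z).1 hmem.1
      exact (List.mem_filter.1 this).2
    have hiff : (PySem.Chars.len (c :: t) = (PySem.Chars.count (c :: t) ['0'] : Int)) ↔ c = '0' := by
      rw [count_singleton, PySem.Chars.len_eq, Nat.cast_inj]
      constructor
      · intro h
        exact (List.count_eq_length.1 h.symm c (by simp)).symm
      · intro h
        subst h
        rw [eq_comm, List.count_eq_length]
        intro b hb
        have hle : b ≤ '0' := by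
          rcases List.mem_cons.1 hb with rfl | hb
          · exact le_rfl
          · exact (List.pairwise_cons.1 hpw).1 b hb
        have hge : '0' ≤ b := by
          have := hdig b hb
          simp only [PySem.Chars.isdigit, Bool.and_eq_true, decide_eq_true_eq] at this
          exact this.1
        exact le_antisymm hge hle
    by_cases h0 : c = '0'
    · rw [if_neg (by simp), if_pos (hiff.2 h0)]
      simp [h0]
    · rw [if_neg (by simp), if_neg (fun h => h0 (hiff.1 h))]
      simp [h0]
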